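-- pv_equiv track=rewrite | github.com/vdiazpa/UC_Tdecomp | uc_tdecomp/RH_main.py | RH_windows_fixes
-- ===== SOURCE A (Python) =====
-- def RH_windows_fixes(T, F, L):
--     #Gets window lengths and fixed time periods given L, F, and T
--     W = F + L
--     t = 1
--     windows = []
--     fixes = []
--
--     t_star = T - W + 1
--     while t <= T:
--         r = T - t + 1
--         H = min(W, r)
--         s_e = list(range(t, t + H))
--         windows.append(s_e)
--
--         # alignment guard: roll less so NEXT start hits s_star
--         w_o = (t + W - 1 > T)
--         w_s = (t < t_star) and (t + min(F, H) > t_star)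
--
--         if (t < t_star) and (w_o or w_s):
--             F_k = min(F, t_star - t, H)
--         else:
--             F_k = min(F, H)
--
--         #final aligned window: if next start is >= t_star, freeze whole H
--         if t >= t_star:
--             fixes.append((t, t + H - 1))
--             t += H
--         else:
--             fixes.append((t, t + F_k - 1))
--             t += F_k
--
--     return windows, fixes
-- ===== SOURCE B (Python) =====
-- def RH_windows_fixes(T, F, L):
--     # Closed form instead of simulating the rolling loop: before t_star the
--     # window starts form an arithmetic progression with stride f = min(F, W)
--     # (A's guard only ever truncates the final stride so the last start hits
--     # exactly max(1, t_star)); the count of rolling starts is the ceiling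
--     # division ceil((t_star - 1) / f), and the final window freezes up to T.
--     W = F + L
--     if T < 1:
--         return [], []
--     t_star = T - W + 1
--     if t_star > 1:
--         f = min(F, W)
--         m = -((1 - t_star) // f)   # ceil((t_star - 1) / f)
--     else:
--         f = 1
--         m = 0
--     roll = [1 + k * f for k in range(m)]
--     s_last = max(1, t_star)
--     windows = [list(range(s, s + W)) for s in roll] + [list(range(s_last, T + 1))]
--     fixes = [(s, nxt - 1) for s, nxt in zip(roll, roll[1:] + [s_last])] + [(s_last, T)]
--     return windows, fixes
-- ===== Notes on version B (the rewrite author's own statement) =====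
-- stated objective: alternative
-- what changed: B replaces A's while-loop simulation by a closed form: the rolling window starts are the arithmetic progression 1 + k*min(F,W) whose length is the ceiling division ceil((t_star-1)/min(F,W)), the final window starts at max(1,t_star) and freezes up to T; windows and fixes are built directly from that formula with no state-advancing loop.
import Mathlib
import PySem

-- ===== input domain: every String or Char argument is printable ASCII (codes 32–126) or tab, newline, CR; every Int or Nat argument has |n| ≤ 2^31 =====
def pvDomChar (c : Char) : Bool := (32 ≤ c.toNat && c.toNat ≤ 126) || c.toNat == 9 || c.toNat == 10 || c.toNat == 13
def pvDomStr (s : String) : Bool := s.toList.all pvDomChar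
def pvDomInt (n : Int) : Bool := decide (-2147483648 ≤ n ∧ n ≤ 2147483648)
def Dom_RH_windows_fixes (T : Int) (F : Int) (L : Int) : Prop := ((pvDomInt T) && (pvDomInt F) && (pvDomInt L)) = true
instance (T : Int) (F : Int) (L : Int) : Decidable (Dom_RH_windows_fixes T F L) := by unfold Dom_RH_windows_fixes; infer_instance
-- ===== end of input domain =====

-- B replaces A's rolling-horizon simulation loop by a closed form: the rolling
-- starts are the arithmetic progression 1 + k*min(F,W) of length ceil((t_star-1)/min(F,W)),
-- and the final window starts at max(1, t_star) (objective: alternative algorithm, same cost).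

-- ===== PORT A =====
-- A's while-loop; fuel (T.toNat + 1) is enough for every terminating run (t grows by ≥ 1 each step inside Pre_).
def RH_loopA (T F W tstar : Int) : Nat → Int → List (List Int) → List (Int × Int) → List (List Int) × List (Int × Int)
  | 0, _, ws, fs => (ws, fs)
  | Nat.succ fuel, t, ws, fs =>
    if t ≤ T then
      let r := T - t + 1
      let H := min W r
      let s_e := PySem.List.pyRange t (t + H) 1
      let ws' := ws ++ [s_e]
      let w_o : Bool := decide (T < t + W - 1)
      let w_s : Bool := decide (t < tstar) && decide (tstar < t + min F H)
      let F_k := if decide (t < tstar) && (w_o || w_s) then min F (min (tstar - t) H) else min F H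
      if tstar ≤ t then
        RH_loopA T F W tstar fuel (t + H) ws' (fs ++ [(t, t + H - 1)])
      else
        RH_loopA T F W tstar fuel (t + F_k) ws' (fs ++ [(t, t + F_k - 1)])
    else (ws, fs)

def RH_windows_fixes (T : Int) (F : Int) (L : Int) : List (List Int) × (List (Int × Int)) :=
  let W := F + L
  let tstar := T - W + 1
  RH_loopA T F W tstar (T.toNat + 1) 1 [] []

-- ===== PORT B =====
def RH_windows_fixes_alt (T : Int) (F : Int) (L : Int) : List (List Int) × (List (Int × Int)) :=
  let W := F + L
  if T < 1 then ([], [])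
  else
    let tstar := T - W + 1
    let fm := if 1 < tstar then (min F W, -(PySem.Int.floordiv (1 - tstar) (min F W))) else ((1 : Int), (0 : Int))
    let roll := (PySem.List.pyRange 0 fm.2 1).map (fun k => 1 + k * fm.1)
    let sLast := max 1 tstar
    (roll.map (fun s => PySem.List.pyRange s (s + W) 1) ++ [PySem.List.pyRange sLast (T + 1) 1],
     (roll.zip (roll.drop 1 ++ [sLast])).map (fun p => (p.1, p.2 - 1)) ++ [(sLast, T)])

-- ===== PRECONDITION & SPEC =====
-- Pre_ excludes exactly the inputs on which A's while-loop never terminates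
-- (T ≥ 1 with a non-positive total window W = F+L, or T > W with F ≤ 0: t stops increasing).
def Pre_RH_windows_fixes (T : Int) (F : Int) (L : Int) : Prop :=
  T < 1 ∨ (1 ≤ F + L ∧ (T ≤ F + L ∨ 1 ≤ F))
instance (T : Int) (F : Int) (L : Int) : Decidable (Pre_RH_windows_fixes T F L) := by unfold Pre_RH_windows_fixes; infer_instance

def pvWitness_RH_windows_fixes : Int × Int × Int := (9, 2, 1)

def Spec_RH_windows_fixes (T : Int) (F : Int) (L : Int) (out : List (List Int) × (List (Int × Int))) : Prop := out = RH_windows_fixes_alt T F L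
instance (T : Int) (F : Int) (L : Int) (out : List (List Int) × (List (Int × Int))) : Decidable (Spec_RH_windows_fixes T F L out) := by unfold Spec_RH_windows_fixes; infer_instance

-- ===== CLAIM (what is proved, stated in full; the proofs are below) =====
def Claim_equal_RH_windows_fixes : Prop := ∀ (T : Int) (F : Int) (L : Int), Dom_RH_windows_fixes T F L → Pre_RH_windows_fixes T F L → Spec_RH_windows_fixes T F L (RH_windows_fixes T F L)

-- ===== LEMMAS AND PROOFS =====

-- The next value of t in A's loop.
def RH_step (T F W tstar t : Int) : Int :=
  if tstar ≤ t then t + min W (T - t + 1)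
  else
    let H := min W (T - t + 1)
    if decide (T < t + W - 1) || decide (tstar < t + min F H) then
      t + min F (min (tstar - t) H)
    else
      t + min F H

-- The sequence of window start positions A's loop visits (proof-side model).
def RH_startsB (T F W tstar : Int) : Nat → Int → List Int
  | 0, _ => []
  | Nat.succ fuel, t =>
    if t ≤ T then t :: RH_startsB T F W tstar fuel (RH_step T F W tstar t) else []

-- The final value of t when the loop is run with the given fuel.
def RH_endP (T F W tstar : Int) : Nat → Int → Int
  | 0, t => t
  | Nat.succ fuel, t => if t ≤ T then RH_endP T F W tstar fuel (RH_step T F W tstar t) else t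

-- Adjacency reconstruction of the fixes (equals B's zip expression).
def RH_adj (e : Int) : List Int → List (Int × Int)
  | [] => []
  | [s] => [(s, e - 1)]
  | s :: u :: rest => (s, u - 1) :: RH_adj e (u :: rest)

theorem RH_adj_eq_zip (e : Int) (l : List Int) :
    (l.zip (l.drop 1 ++ [e])).map (fun p => (p.1, p.2 - 1)) = RH_adj e l := by
  induction l with
  | nil => rfl
  | cons s rest ih =>
    cases rest with
    | nil => rfl
    | cons u rest' =>
      simp only [List.drop_succ_cons, List.drop_zero] at ih ⊢
      simp only [List.cons_append, List.zip_cons_cons, List.map_cons, RH_adj]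
      rw [ih]

theorem RH_adj_append_single (e x : Int) (l : List Int) :
    RH_adj e (l ++ [x]) = RH_adj x l ++ [(x, e - 1)] := by
  induction l with
  | nil => rfl
  | cons s rest ih =>
    cases rest with
    | nil => rfl
    | cons u rest' =>
      rw [List.cons_append] at ih
      show RH_adj e (s :: u :: (rest' ++ [x])) = ((s, u - 1) :: RH_adj x (u :: rest')) ++ [(x, e - 1)]
      rw [show RH_adj e (s :: u :: (rest' ++ [x])) = (s, u - 1) :: RH_adj e (u :: (rest' ++ [x])) from rfl, ih]
      rfl

theorem RH_startsB_nil_end (T F W tstar : Int) (fuel : Nat) (t : Int)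
    (h : RH_startsB T F W tstar fuel t = []) : RH_endP T F W tstar fuel t = t := by
  cases fuel with
  | zero => rfl
  | succ fuel =>
    by_cases ht : t ≤ T
    · simp [RH_startsB, ht] at h
    · simp [RH_endP, ht]

theorem RH_startsB_cons (T F W tstar : Int) (fuel : Nat) (t : Int)
    (h : RH_startsB T F W tstar fuel t ≠ []) :
    ∃ rest, RH_startsB T F W tstar fuel t = t :: rest := by
  cases fuel with
  | zero => exact absurd rfl h
  | succ fuel =>
    by_cases ht : t ≤ T
    · exact ⟨RH_startsB T F W tstar fuel (RH_step T F W tstar t), by simp [RH_startsB, ht]⟩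
    · simp [RH_startsB, ht] at h

theorem RH_startsB_gt (T F W tstar : Int) (fuel : Nat) (t : Int) (h : T < t) :
    RH_startsB T F W tstar fuel t = [] := by
  cases fuel with
  | zero => rfl
  | succ fuel => simp [RH_startsB, show ¬ t ≤ T by omega]

-- A final aligned window: one start, then the loop leaves [1, T].
theorem RH_startsB_last (T F W tstar : Int) (fuel : Nat) (t : Int)
    (h1 : tstar ≤ t) (h2 : t ≤ T) (h3 : T < t + min W (T - t + 1)) :
    RH_startsB T F W tstar (fuel + 1) t = [t] := by
  simp only [RH_startsB, if_pos h2]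
  rw [show RH_step T F W tstar t = t + min W (T - t + 1) by simp [RH_step, h1]]
  rw [RH_startsB_gt _ _ _ _ _ _ h3]

-- The main invariant: A's loop returns the windows and adjacency fixes of its start sequence.
theorem RH_loopA_eq (T F W tstar : Int) (fuel : Nat) :
    ∀ (t : Int) (ws : List (List Int)) (fs : List (Int × Int)),
    RH_loopA T F W tstar fuel t ws fs =
      (ws ++ (RH_startsB T F W tstar fuel t).map
          (fun s => PySem.List.pyRange s (s + min W (T - s + 1)) 1),
       fs ++ RH_adj (RH_endP T F W tstar fuel t) (RH_startsB T F W tstar fuel t)) := by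
  induction fuel with
  | zero => intro t ws fs; simp [RH_loopA, RH_startsB, RH_adj]
  | succ fuel ih =>
    intro t ws fs
    simp only [RH_startsB]
    by_cases ht : t ≤ T
    · simp only [if_pos ht]
      have hend : RH_endP T F W tstar (fuel + 1) t
          = RH_endP T F W tstar fuel (RH_step T F W tstar t) := by
        simp [RH_endP, ht]
      rw [hend]
      by_cases hs : tstar ≤ t
      · have hstep : RH_step T F W tstar t = t + min W (T - t + 1) := by
          simp [RH_step, hs]
        have hA : RH_loopA T F W tstar (fuel + 1) t ws fs =
            RH_loopA T F W tstar fuel (t + min W (T - t + 1))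
              (ws ++ [PySem.List.pyRange t (t + min W (T - t + 1)) 1])
              (fs ++ [(t, t + min W (T - t + 1) - 1)]) := by
          simp [RH_loopA, ht, hs]
        rw [← hstep] at hA
        rw [hA, ih]
        simp only [Prod.mk.injEq]
        refine ⟨by rw [hstep]; simp, ?_⟩
        rcases eq_or_ne (RH_startsB T F W tstar fuel (RH_step T F W tstar t)) [] with hnil | hne
        · rw [hnil, RH_startsB_nil_end _ _ _ _ _ _ hnil]
          simp [RH_adj, hstep]
        · obtain ⟨rest, hrest⟩ := RH_startsB_cons _ _ _ _ _ _ hne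
          rw [hrest]
          simp [RH_adj, hstep]
      · have hlt : t < tstar := lt_of_not_ge hs
        have hFk : (if decide (t < tstar) &&
              ((decide (T < t + W - 1)) || (decide (t < tstar) && decide (tstar < t + min F (min W (T - t + 1)))))
            then min F (min (tstar - t) (min W (T - t + 1))) else min F (min W (T - t + 1)))
            = (if decide (T < t + W - 1) || decide (tstar < t + min F (min W (T - t + 1)))
               then min F (min (tstar - t) (min W (T - t + 1))) else min F (min W (T - t + 1))) := by
          simp [hlt]
        have hstep : RH_step T F W tstar t =
            t + (if decide (T < t + W - 1) || decide (tstar < t + min F (min W (T - t + 1)))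
               then min F (min (tstar - t) (min W (T - t + 1))) else min F (min W (T - t + 1))) := by
          simp only [RH_step, if_neg hs]
          by_cases hc : (decide (T < t + W - 1) || decide (tstar < t + min F (min W (T - t + 1)))) = true
          · simp [hc]
          · simp [hc]
        have hA : RH_loopA T F W tstar (fuel + 1) t ws fs =
            RH_loopA T F W tstar fuel (RH_step T F W tstar t)
              (ws ++ [PySem.List.pyRange t (t + min W (T - t + 1)) 1])
              (fs ++ [(t, RH_step T F W tstar t - 1)]) := by
          simp only [RH_loopA, if_pos ht, if_neg hs, hFk, hstep]
        rw [hA, ih]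
        simp only [Prod.mk.injEq]
        refine ⟨by simp, ?_⟩
        rcases eq_or_ne (RH_startsB T F W tstar fuel (RH_step T F W tstar t)) [] with hnil | hne
        · rw [hnil, RH_startsB_nil_end _ _ _ _ _ _ hnil]
          simp [RH_adj]
        · obtain ⟨rest, hrest⟩ := RH_startsB_cons _ _ _ _ _ _ hne
          rw [hrest]
          simp [RH_adj]
    · simp [RH_loopA, RH_endP, ht, RH_adj]

-- Termination: inside Pre_, with enough fuel the loop's final t is exactly T + 1.
theorem RH_endP_eq (T F L : Int) (hW : 1 ≤ F + L) (hF : T ≤ F + L ∨ 1 ≤ F) :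
    ∀ (fuel : Nat) (t : Int), 1 ≤ t → t ≤ T → (T - t).toNat < fuel →
      RH_endP T F (F + L) (T - (F + L) + 1) fuel t = T + 1 := by
  intro fuel
  induction fuel with
  | zero => intro t _ _ h; omega
  | succ fuel ih =>
    intro t ht1 htT hfuel
    simp only [RH_endP, if_pos htT]
    set W := F + L with hWdef
    set tstar := T - W + 1 with hts
    by_cases hs : tstar ≤ t
    · have hstep : RH_step T F W tstar t = T + 1 := by
        simp only [RH_step, if_pos hs]
        omega
      rw [hstep]
      cases fuel with
      | zero => rfl
      | succ fuel => simp [RH_endP, show ¬ (T + 1 ≤ T) by omega]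
    · have hlt : t < tstar := lt_of_not_ge hs
      have hF1 : 1 ≤ F := by
        rcases hF with h | h
        · omega
        · exact h
      have hH : min W (T - t + 1) = W := by omega
      have hbound : t < RH_step T F W tstar t ∧ RH_step T F W tstar t ≤ T := by
        simp only [RH_step, if_neg hs, hH]
        by_cases hc : (decide (T < t + W - 1) || decide (tstar < t + min F W)) = true
        · simp only [hc, if_pos]
          constructor <;> omega
        · simp only [hc, if_neg, Bool.not_eq_true]
          simp only [Bool.or_eq_true, decide_eq_true_eq, not_or, not_lt] at hc
          constructor <;> omega
      exact ih (RH_step T F W tstar t) (by omega) hbound.2 (by omega)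

-- The start sequence is the arithmetic progression with stride f = min F W, ending at tstar.
theorem RH_startsB_prog (T F W tstar f : Int) (hW : 1 ≤ W) (hF : 1 ≤ F)
    (htseq : tstar = T - W + 1) (hfdef : f = min F W) :
    ∀ (mN : Nat) (fuel : Nat) (t : Int), t < tstar →
      ((mN : Int) - 1) * f < tstar - t → tstar - t ≤ (mN : Int) * f →
      (tstar - t).toNat < fuel →
      RH_startsB T F W tstar fuel t =
        (List.range mN).map (fun k : Nat => t + (k : Int) * f) ++ [tstar] := by
  intro mN
  induction mN with
  | zero =>
    intro fuel t h1 _ h3 _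
    exfalso
    simp only [Nat.cast_zero, zero_mul] at h3
    omega
  | succ n ih =>
    intro fuel t h1 h2 h3 hfuel
    have hf1 : 1 ≤ f := by omega
    obtain ⟨fl, rfl⟩ : ∃ fl, fuel = fl + 1 := ⟨fuel - 1, by omega⟩
    have hcast : ((n + 1 : Nat) : Int) = (n : Int) + 1 := by push_cast; ring
    rw [hcast] at h2 h3
    have h2' : (n : Int) * f < tstar - t := by
      have e : ((n : Int) + 1 - 1) * f = (n : Int) * f := by ring
      rw [e] at h2; exact h2
    have h3' : tstar - t ≤ (n : Int) * f + f := by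
      have e : ((n : Int) + 1) * f = (n : Int) * f + f := by ring
      rw [e] at h3; exact h3
    have htT : t ≤ T := by omega
    simp only [RH_startsB, if_pos htT]
    have hH : min W (T - t + 1) = W := by omega
    have hlastB : ∀ n', RH_startsB T F W tstar (n' + 1) tstar = [tstar] := by
      intro n'
      exact RH_startsB_last T F W tstar n' tstar le_rfl (by omega) (by omega)
    by_cases hc : t + f < tstar
    · -- non-final rolling step: stride f
      have hstep : RH_step T F W tstar t = t + f := by
        simp only [RH_step, if_neg (not_le.mpr h1), hH]
        rw [if_neg]
        · omega
        · simp only [Bool.or_eq_true, decide_eq_true_eq, not_or, not_lt]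
          omega
      rw [hstep]
      have e1 : ((n : Int) - 1) * f = (n : Int) * f - f := by ring
      have := ih fl (t + f) (by omega)
        (by rw [e1]; linarith) (by linarith) (by omega)
      rw [this]
      rw [List.range_succ_eq_map]
      simp only [List.map_cons, List.map_map, Nat.cast_zero, zero_mul, add_zero, List.cons_append]
      congr 2
      apply List.map_congr_left
      intro k _
      simp only [Function.comp_apply]
      push_cast
      ring
    · -- final rolling step: truncate to tstar, then the aligned window
      have hn0 : n = 0 := by
        by_contra hne
        have h1n : (1:Int) ≤ (n:Int) := by exact_mod_cast Nat.one_le_iff_ne_zero.mpr hne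
        have : f ≤ (n:Int) * f := le_mul_of_one_le_left (by omega) h1n
        have : tstar - t ≤ f := by omega
        linarith
      subst hn0
      have hstep : RH_step T F W tstar t = tstar := by
        simp only [RH_step, if_neg (not_le.mpr h1), hH]
        by_cases hg : tstar < t + min F W
        · rw [if_pos]
          · omega
          · simp only [Bool.or_eq_true, decide_eq_true_eq]
            right; omega
        · rw [if_neg]
          · omega
          · simp only [Bool.or_eq_true, decide_eq_true_eq, not_or, not_lt]
            omega
      rw [hstep]
      obtain ⟨fl', rfl⟩ : ∃ fl', fl = fl' + 1 := ⟨fl - 1, by omega⟩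
      rw [hlastB]
      simp [List.range_succ]

-- ===== VERDICT (by name: the statement is the Claim_ definition above) =====
theorem RH_windows_fixes_spec : Claim_equal_RH_windows_fixes := by
  intro T F L _hdom hpre
  unfold Spec_RH_windows_fixes RH_windows_fixes RH_windows_fixes_alt
  simp only
  rw [RH_loopA_eq]
  by_cases hT : T < 1
  · rw [if_pos hT]
    rw [RH_startsB_gt _ _ _ _ _ _ (by omega)]
    simp [RH_adj]
  · rw [if_neg hT]
    rcases hpre with h | ⟨hW, hF⟩
    · omega
    have hend : RH_endP T F (F + L) (T - (F + L) + 1) (T.toNat + 1) 1 = T + 1 :=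
      RH_endP_eq T F L hW hF (T.toNat + 1) 1 le_rfl (by omega) (by omega)
    rw [hend]
    by_cases hts : 1 < T - (F + L) + 1
    · -- rolling case: T > W
      rw [if_pos hts]
      have hF1 : 1 ≤ F := by rcases hF with h | h; omega; exact h
      have hf1 : 1 ≤ min F (F + L) := by omega
      set W := F + L with hWdef
      set tstar := T - W + 1 with htsdef
      set f := min F W with hfdef
      set m := -(PySem.Int.floordiv (1 - tstar) f) with hmdef
      have hbr : ((m - 1) * f < tstar - 1 ∧ tstar - 1 ≤ m * f) := by
        have h := (PySem.Int.neg_floordiv_neg_eq_iff_of_pos (a := tstar - 1) (b := f)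
          (by omega) (q := m)).mp ?_
        · exact h
        · rw [hmdef]; congr 2; omega
      have hm1 : 1 ≤ m := by
        by_contra hmle
        have : m * f ≤ 0 := mul_nonpos_of_nonpos_of_nonneg (by omega) (by omega)
        omega
      obtain ⟨mN, hmN⟩ : ∃ mN : Nat, m = (mN : Int) := ⟨m.toNat, by omega⟩
      have hstarts := RH_startsB_prog T F W tstar f hW hF1 htsdef hfdef mN (T.toNat + 1) 1
        (by omega) (by rw [← hmN]; omega) (by rw [← hmN]; omega) (by omega)
      rw [hstarts]
      have hroll : (PySem.List.pyRange 0 m 1).map (fun k => 1 + k * f)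
          = (List.range mN).map (fun k : Nat => 1 + (k : Int) * f) := by
        rw [PySem.List.pyRange_one]
        rw [List.map_map]
        rw [show (m - 0).toNat = mN by omega]
        apply List.map_congr_left
        intro k _
        simp
      rw [hroll]
      have hmem : ∀ k ∈ List.range mN, 1 + (k : Int) * f ≤ tstar := by
        intro k hk
        have hk' : (k : Int) ≤ m - 1 := by
          have := List.mem_range.mp hk
          omega
        have : (k : Int) * f ≤ (m - 1) * f := mul_le_mul_of_nonneg_right hk' (by omega)
        omega
      have hmax : max 1 tstar = tstar := by omega
      rw [hmax]
      simp only [Prod.mk.injEq]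
      refine ⟨?_, ?_⟩
      · -- windows
        rw [List.nil_append, List.map_append]
        simp only [List.map_map, List.map_cons, List.map_nil]
        congr 1
        · apply List.map_congr_left
          intro k hk
          have := hmem k hk
          simp only [Function.comp_apply]
          congr 2
          omega
        · have hlastw : tstar + min W (T - tstar + 1) = T + 1 := by omega
          rw [hlastw]
      · -- fixes
        rw [List.nil_append, RH_adj_append_single, RH_adj_eq_zip]
        norm_num
    · -- single-window case: T ≤ W
      rw [if_neg hts]
      have hTW : T ≤ F + L := by omega
      have hstarts : RH_startsB T F (F + L) (T - (F + L) + 1) (T.toNat + 1) 1 = [1] := by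
        obtain ⟨n, hn⟩ : ∃ n, T.toNat + 1 = n + 1 := ⟨T.toNat, rfl⟩
        rw [hn]
        exact RH_startsB_last _ _ _ _ _ _ (by omega) (by omega) (by omega)
      rw [hstarts]
      have hmax : max 1 (T - (F + L) + 1) = 1 := by omega
      have hrange0 : PySem.List.pyRange 0 0 1 = [] := PySem.List.pyRange_one_eq_nil le_rfl
      simp only [hmax, hrange0, List.map_nil, List.nil_append, List.map_cons, RH_adj,
        List.zip_nil_left]
      have h1 : 1 + min (F + L) (T - 1 + 1) = T + 1 := by omega
      rw [h1]
      norm_num
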